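-- pv_equiv track=rewrite | github.com/sonjuhyeon/programmers_coding_test | 프로그래머스/3/150367. 표현 가능한 이진트리/표현 가능한 이진트리.py | complete_binary_tree
-- ===== SOURCE A (Python) =====
-- def complete_binary_tree(binary):
--     n_len = len(binary)
--
--     number_of_node = 1 # 완전이진트리가 되기 위한 node 개수
--     while n_len >= number_of_node:
--         number_of_node *= 2
--     number_of_node -= 1 # (N^2)-1
--
--     for i in range(number_of_node - n_len):
--         binary = '0' + binary
--     return binary
-- ===== SOURCE B (Python) =====
-- def complete_binary_tree(binary):
--     # closed form: smallest 2^k - 1 >= len(binary), pad in one concatenation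
--     target = (1 << len(binary).bit_length()) - 1
--     return '0' * (target - len(binary)) + binary
-- ===== Notes on version B (the rewrite author's own statement) =====
-- stated objective: faster
-- what changed: Replaces the doubling while-loop with the closed form (1 << n.bit_length()) - 1 and the character-at-a-time prepend loop with a single string multiplication and concatenation.
import Mathlib
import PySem

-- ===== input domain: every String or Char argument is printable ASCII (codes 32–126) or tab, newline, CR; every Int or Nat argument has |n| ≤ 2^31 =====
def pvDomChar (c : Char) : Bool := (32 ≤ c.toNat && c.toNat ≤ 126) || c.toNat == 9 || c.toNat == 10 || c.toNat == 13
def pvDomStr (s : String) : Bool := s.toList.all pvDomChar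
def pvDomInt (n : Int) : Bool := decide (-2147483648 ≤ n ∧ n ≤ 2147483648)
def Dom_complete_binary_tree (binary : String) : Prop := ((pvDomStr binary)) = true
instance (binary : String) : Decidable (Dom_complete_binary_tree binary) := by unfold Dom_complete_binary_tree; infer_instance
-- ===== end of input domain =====

-- B replaces A's doubling while-loop and char-by-char prepend loop with the
-- bit_length closed form and a single replicate-and-append (simpler).


-- ===== PORT A =====
-- the 'while n_len >= number_of_node: number_of_node *= 2' loop
def pvLoopA (n node : Nat) (h : 0 < node) : Nat :=
  if n ≥ node then pvLoopA n (node * 2) (by omega) else node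
termination_by n + 1 - node
decreasing_by omega

-- the 'for i in range(m): binary = '0' + binary' loop
def pvPrependZeros : Nat → List Char → List Char
  | 0, cs => cs
  | k + 1, cs => pvPrependZeros k ('0' :: cs)

def complete_binary_tree (binary : String) : String :=
  let n_len := binary.toList.length
  let number_of_node := pvLoopA n_len 1 (by omega)
  let number_of_node := number_of_node - 1
  String.mk (pvPrependZeros (number_of_node - n_len) binary.toList)

-- ===== PORT B =====
def complete_binary_tree_alt (binary : String) : String :=
  let n := binary.toList.length
  let target : Int := (1 <<< PySem.Int.bitLength (n : Int)) - 1
  String.mk (List.replicate (target - (n : Int)).toNat '0' ++ binary.toList)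

-- ===== PRECONDITION & SPEC =====
def Spec_complete_binary_tree (binary : String) (out : String) : Prop := out = complete_binary_tree_alt binary
instance (binary : String) (out : String) : Decidable (Spec_complete_binary_tree binary out) := by unfold Spec_complete_binary_tree; infer_instance

-- ===== CLAIM (what is proved, stated in full; the proofs are below) =====
def Claim_equal_complete_binary_tree : Prop := ∀ (binary : String), Dom_complete_binary_tree binary → Spec_complete_binary_tree binary (complete_binary_tree binary)

-- ===== LEMMAS AND PROOFS =====
lemma pvPrependZeros_eq (k : Nat) (cs : List Char) :
    pvPrependZeros k cs = List.replicate k '0' ++ cs := by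
  induction k generalizing cs with
  | zero => simp [pvPrependZeros]
  | succ k ih =>
      rw [pvPrependZeros, ih, List.replicate_succ' ]
      simp

lemma pvLoopA_pow (n : Nat) :
    ∀ j : Nat, pvLoopA n (2 ^ (PySem.Int.bitLength (n : Int) - j)) (by positivity)
      = 2 ^ PySem.Int.bitLength (n : Int) := by
  intro j
  induction j with
  | zero =>
      rw [pvLoopA]
      have hlt : n < 2 ^ PySem.Int.bitLength (n : Int) := by
        have := PySem.Int.lt_two_pow_bitLength (n : Int)
        simpa using this
      simp [Nat.not_le.mpr hlt]
  | succ j ih =>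
      set bl := PySem.Int.bitLength (n : Int) with hbl
      by_cases hj : j + 1 ≤ bl
      · -- i = bl - (j+1) < bl, so 2^i ≤ n and the loop doubles
        have hi : bl - (j + 1) < bl := by omega
        have hn0 : n ≠ 0 := by
          intro h0
          rw [h0] at hbl
          simp [PySem.Int.bitLength_zero] at hbl
          omega
        have hle : 2 ^ (bl - (j + 1)) ≤ n := by
          have h1 : 2 ^ (bl - (j + 1)) ≤ 2 ^ (bl - 1) :=
            Nat.pow_le_pow_right (by omega) (by omega)
          have h2 : 2 ^ (bl - 1) ≤ n := by
            have := PySem.Int.two_pow_bitLength_le (n : Int) (by exact_mod_cast hn0)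
            simpa [hbl] using this
          omega
        rw [pvLoopA]
        simp only [ge_iff_le, hle, if_pos]
        have hstep : 2 ^ (bl - (j + 1)) * 2 = 2 ^ (bl - j) := by
          rw [← Nat.pow_succ]
          congr 1
          omega
        simp only [hstep]
        exact ih
      · have : bl - (j + 1) = bl - j := by omega
        rw [this]
        exact ih

-- ===== VERDICT (by name: the statement is the Claim_ definition above) =====
theorem complete_binary_tree_spec : Claim_equal_complete_binary_tree := by
  intro binary _
  unfold Spec_complete_binary_tree complete_binary_tree complete_binary_tree_alt
  have hloop : pvLoopA binary.toList.length 1 (by omega)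
      = 2 ^ PySem.Int.bitLength (binary.toList.length : Int) := by
    simpa using pvLoopA_pow binary.toList.length (PySem.Int.bitLength (binary.toList.length : Int))
  have hlt : binary.toList.length < 2 ^ PySem.Int.bitLength (binary.toList.length : Int) := by
    simpa using PySem.Int.lt_two_pow_bitLength (binary.toList.length : Int)
  have hshl : (1 <<< PySem.Int.bitLength (binary.toList.length : Int) : Nat)
      = 2 ^ PySem.Int.bitLength (binary.toList.length : Int) := by
    simp [Nat.shiftLeft_eq]
  simp only [hloop, pvPrependZeros_eq, hshl]
  have hc : (((2 ^ PySem.Int.bitLength (binary.toList.length : Int) : Nat) : Int) - 1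
      - (binary.toList.length : Int)).toNat
      = 2 ^ PySem.Int.bitLength (binary.toList.length : Int) - 1 - binary.toList.length := by
    generalize hp : 2 ^ PySem.Int.bitLength (binary.toList.length : Int) = p at hlt ⊢
    omega
  rw [hc]
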